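-- pv_equiv track=rewrite | github.com/huzhengyu2016/FGeo-NSS | src/nss/tools.py | _get_algebraic_constraint
-- ===== SOURCE A (Python) =====
-- def _get_algebraic_constraint(algebraic_constraints, added_paras):
--     algebraic_constraint = []  # (relation_type, expr, paras)
--     for i in range(len(algebraic_constraints))[::-1]:
--         ac_check_type, ac_check_expr, ac_check_paras = algebraic_constraints[i]
--         if len(set(ac_check_paras) - set(added_paras)) == 0:
--             algebraic_constraint.append(algebraic_constraints[i])
--             algebraic_constraints.pop(i)
--     # sort according to the number of paras
--     algebraic_constraint = sorted(algebraic_constraint, key=lambda x: (len(x[2]), len(set(x[2]))), reverse=True)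
--     algebraic_constraint = tuple([(relation_type, expr) for relation_type, expr, _ in algebraic_constraint])
--     return algebraic_constraint
-- ===== SOURCE B (Python) =====
-- def _get_algebraic_constraint(algebraic_constraints, added_paras):
--     added = set(added_paras)
--     removed = [c for c in reversed(algebraic_constraints) if set(c[2]) <= added]
--     kept = [c for c in algebraic_constraints if not (set(c[2]) <= added)]
--     algebraic_constraints[:] = kept
--     removed.sort(key=lambda x: (len(x[2]), len(set(x[2]))), reverse=True)
--     return tuple((relation_type, expr) for relation_type, expr, _ in removed)
-- ===== Notes on version B (the rewrite author's own statement) =====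
-- stated objective: faster
-- what changed: Replaces the reverse index loop that pops matched constraints out of the list one by one (each pop shifts the tail) with two filter comprehensions (removed = reversed matches, kept = non-matches assigned back in place), then the same stable sort and projection.
import Mathlib
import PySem

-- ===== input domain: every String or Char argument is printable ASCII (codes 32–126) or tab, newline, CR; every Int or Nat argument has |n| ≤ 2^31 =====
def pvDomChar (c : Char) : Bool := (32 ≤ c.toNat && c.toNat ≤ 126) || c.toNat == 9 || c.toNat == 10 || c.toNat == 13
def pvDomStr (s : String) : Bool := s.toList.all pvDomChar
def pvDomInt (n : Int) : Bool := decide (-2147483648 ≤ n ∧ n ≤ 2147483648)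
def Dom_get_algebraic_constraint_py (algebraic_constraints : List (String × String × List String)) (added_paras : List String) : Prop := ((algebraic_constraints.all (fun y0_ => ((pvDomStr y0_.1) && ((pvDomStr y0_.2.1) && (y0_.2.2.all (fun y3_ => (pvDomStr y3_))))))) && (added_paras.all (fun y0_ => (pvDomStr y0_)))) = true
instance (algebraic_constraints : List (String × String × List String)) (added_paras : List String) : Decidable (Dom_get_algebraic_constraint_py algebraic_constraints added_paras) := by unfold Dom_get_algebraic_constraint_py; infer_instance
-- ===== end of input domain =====

-- B partitions with two comprehensions instead of popping in a reverse index loop, removing the quadratic pop(i) shifting (objective: faster, measured).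
-- Both A and B mutate the argument in place identically (A pops matches, B assigns the kept list);
-- the equivalence proved here is about the RETURN value only.

-- ===== PORT A =====
-- the reverse index loop `for i in range(len(...))[::-1]`, with the list being popped and the
-- collected constraints as state; `i+1` is the loop counter, the current index is `i`
def pvALoop (added_paras : List String) :
    Nat → List (String × String × List String) → List (String × String × List String) →
    List (String × String × List String) × List (String × String × List String)
  | 0, cs, acc => (cs, acc)
  | i+1, cs, acc =>
    match PySem.List.pyGet? cs (i : Int) with
    | none => (cs, acc)  -- unreachable: i is always in range
    | some c =>
      if PySem.Set.len (PySem.Set.diff (PySem.Set.ofList c.2.2) (PySem.Set.ofList added_paras)) == 0 then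
        match PySem.List.pop? cs (i : Int) with
        | none => (cs, acc ++ [c])  -- unreachable
        | some (_, cs') => pvALoop added_paras i cs' (acc ++ [c])
      else
        pvALoop added_paras i cs acc

def get_algebraic_constraint_py (algebraic_constraints : List (String × String × List String)) (added_paras : List String) : List (String × String) :=
  let st := pvALoop added_paras algebraic_constraints.length algebraic_constraints []
  let algebraic_constraint :=
    PySem.List.sorted2 st.2 (fun x => x.2.2.length) (fun x => (PySem.Set.ofList x.2.2).length) true
  algebraic_constraint.map (fun c => (c.1, c.2.1))

-- ===== PORT B =====
def get_algebraic_constraint_py_alt (algebraic_constraints : List (String × String × List String)) (added_paras : List String) : List (String × String) :=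
  let added := PySem.Set.ofList added_paras
  let removed := algebraic_constraints.reverse.filter
    (fun c => PySem.Set.issubset (PySem.Set.ofList c.2.2) added)
  (PySem.List.sorted2 removed (fun x => x.2.2.length) (fun x => (PySem.Set.ofList x.2.2).length) true).map
    (fun c => (c.1, c.2.1))

-- ===== PRECONDITION & SPEC =====
def Spec_get_algebraic_constraint_py (algebraic_constraints : List (String × String × List String)) (added_paras : List String) (out : List (String × String)) : Prop := out = get_algebraic_constraint_py_alt algebraic_constraints added_paras
instance (algebraic_constraints : List (String × String × List String)) (added_paras : List String) (out : List (String × String)) : Decidable (Spec_get_algebraic_constraint_py algebraic_constraints added_paras out) := by unfold Spec_get_algebraic_constraint_py; infer_instance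

-- ===== CLAIM (what is proved, stated in full; the proofs are below) =====
def Claim_equal_get_algebraic_constraint_py : Prop := ∀ (algebraic_constraints : List (String × String × List String)) (added_paras : List String), Dom_get_algebraic_constraint_py algebraic_constraints added_paras → Spec_get_algebraic_constraint_py algebraic_constraints added_paras (get_algebraic_constraint_py algebraic_constraints added_paras)

-- ===== LEMMAS AND PROOFS =====

-- A's emptiness test on the set difference is B's subset test
theorem pv_cond_eq (p a : List String) :
    (PySem.Set.len (PySem.Set.diff (PySem.Set.ofList p) (PySem.Set.ofList a)) == 0)
      = PySem.Set.issubset (PySem.Set.ofList p) (PySem.Set.ofList a) := by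
  rw [Bool.eq_iff_iff]
  simp only [beq_iff_eq, PySem.Set.issubset_iff, PySem.Set.len, Nat.cast_eq_zero,
    List.length_eq_zero_iff, List.eq_nil_iff_forall_not_mem, PySem.Set.mem_diff,
    PySem.Set.mem_ofList]
  constructor
  · intro h x hx
    by_contra hna
    exact h x ⟨hx, hna⟩
  · intro h x ⟨hx, hna⟩
    exact hna (h x hx)

-- A's reverse pop loop, run on `l ++ tail` with counter `l.length`, never touches `tail`:
-- it leaves the non-matching prefix elements plus `tail`, and collects l's matches back to front
theorem pvALoop_spec (added_paras : List String) (l : List (String × String × List String)) :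
    ∀ (tail acc : List (String × String × List String)),
    pvALoop added_paras l.length (l ++ tail) acc =
      (l.filter (fun c => !PySem.Set.issubset (PySem.Set.ofList c.2.2) (PySem.Set.ofList added_paras)) ++ tail,
       acc ++ l.reverse.filter (fun c => PySem.Set.issubset (PySem.Set.ofList c.2.2) (PySem.Set.ofList added_paras))) := by
  induction l using List.reverseRecOn with
  | nil => intro tail acc; simp [pvALoop]
  | append_singleton l' c ih =>
    intro tail acc
    have hlen : (l' ++ [c]).length = l'.length + 1 := by simp
    rw [hlen, List.append_assoc]
    show pvALoop added_paras (l'.length + 1) (l' ++ ([c] ++ tail)) acc = _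
    rw [pvALoop]
    rw [show l' ++ ([c] ++ tail) = l' ++ (c :: tail) by simp]
    rw [PySem.List.pyGet?_append_length]
    simp only [pv_cond_eq]
    by_cases hc : PySem.Set.issubset (PySem.Set.ofList c.2.2) (PySem.Set.ofList added_paras) = true
    · rw [if_pos hc]
      have hlt : l'.length < (l' ++ c :: tail).length := by simp
      rw [PySem.List.pop?_natCast (l' ++ c :: tail) l'.length hlt]
      have herase : (l' ++ c :: tail).eraseIdx l'.length = l' ++ tail := by
        rw [List.eraseIdx_append_of_length_le (by omega)]
        simp
      simp only [herase, ih tail (acc ++ [c])]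
      simp [List.filter_append, hc, List.append_assoc]
    · rw [if_neg hc]
      have := ih (c :: tail) acc
      rw [show l' ++ c :: tail = l' ++ ([c] ++ tail) by simp] at this ⊢
      rw [this]
      simp [List.filter_append, hc, List.append_assoc]

-- ===== VERDICT (by name: the statement is the Claim_ definition above) =====
theorem get_algebraic_constraint_py_spec : Claim_equal_get_algebraic_constraint_py := by
  intro cs added _
  show get_algebraic_constraint_py cs added = get_algebraic_constraint_py_alt cs added
  unfold get_algebraic_constraint_py get_algebraic_constraint_py_alt
  have h := pvALoop_spec added cs [] []
  rw [List.append_nil] at h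
  simp only [h, List.nil_append]
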